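-- pv_equiv track=rewrite | github.com/cgandrey-afk/fluxoderotas | app.py | formatar_sequencia_visual
-- ===== SOURCE A (Python) =====
-- def formatar_sequencia_visual(lista_seq):
--     numeros = []
--     adicionais = 0
--     for s in lista_seq:
--         s_str = str(s).strip()
--         if s_str in ['-', 'nan', '', 'None']: adicionais += 1
--         else:
--             num = "".join(filter(str.isdigit, s_str.split('.')[0]))
--             if num: numeros.append(int(num))
--
--     # 1 CAIXINHA NO SEQUENCE
--     if not numeros: return "📦 Sem Ordem" if adicionais == 0 else f"📦 {adicionais} Adds"
--
--     numeros = sorted(list(set(numeros)))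
--     ranges = []
--     start, last = numeros[0], numeros[0]
--     for n in numeros[1:]:
--         if n == last + 1: last = n
--         else:
--             ranges.append(f"{start} ao {last}" if start != last else str(start))
--             start = last = n
--     ranges.append(f"{start} ao {last}" if start != last else str(start))
--
--     resumo = "Pacote " + ", ".join(ranges)
--     if adicionais > 0: resumo += f" + {adicionais} Add"
--     return f"📦 {resumo}"
-- ===== SOURCE B (Python) =====
-- def _runs(start, last, rest):
--     # list of (first, last) pairs of maximal consecutive runs, by recursion
--     if not rest:
--         return [(start, last)]
--     n, tail = rest[0], rest[1:]
--     if n == last + 1: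
--         return _runs(start, n, tail)
--     return [(start, last)] + _runs(n, n, tail)
--
-- def formatar_sequencia_visual(lista_seq):
--     cleaned = [str(s).strip() for s in lista_seq]
--     adicionais = len([t for t in cleaned if t in ('-', 'nan', '', 'None')])
--     nums = set()
--     for t in cleaned:
--         if t not in ('-', 'nan', '', 'None'):
--             d = "".join(ch for ch in t.split('.')[0] if ch.isdigit())
--             if d:
--                 nums.add(int(d))
--     if not nums:
--         return "📦 Sem Ordem" if adicionais == 0 else f"📦 {adicionais} Adds"
--     nums = sorted(nums)
--     runs = _runs(nums[0], nums[0], nums[1:])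
--     corpo = ", ".join(str(a) if a == b else f"{a} ao {b}" for a, b in runs)
--     resumo = "Pacote " + corpo
--     if adicionais > 0:
--         resumo += f" + {adicionais} Add"
--     return f"📦 {resumo}"
-- ===== Notes on version B (the rewrite author's own statement) =====
-- stated objective: alternative
-- what changed: Replaces A's single accumulator loop carrying (ranges, start, last) by a recursive run-splitter returning (first, last) pairs that are rendered and joined afterwards, and splits A's one parsing pass with two mutated accumulators into a strip pass, a count, and a set built directly while filtering.
import Mathlib
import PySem

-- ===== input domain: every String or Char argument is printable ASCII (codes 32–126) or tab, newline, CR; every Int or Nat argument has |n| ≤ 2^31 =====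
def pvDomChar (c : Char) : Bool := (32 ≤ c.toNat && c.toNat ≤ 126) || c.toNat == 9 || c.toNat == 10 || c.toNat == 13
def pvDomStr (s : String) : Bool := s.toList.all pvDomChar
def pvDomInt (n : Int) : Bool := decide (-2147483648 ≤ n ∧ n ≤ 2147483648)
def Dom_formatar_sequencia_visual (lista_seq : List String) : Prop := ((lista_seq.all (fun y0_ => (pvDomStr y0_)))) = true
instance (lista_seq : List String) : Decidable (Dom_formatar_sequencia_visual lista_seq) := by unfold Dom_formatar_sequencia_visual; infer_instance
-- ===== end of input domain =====

-- B replaces A's accumulator range loop by a recursive run-splitter producing (first,last)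
-- pairs rendered afterwards, and A's one-pass parse by separate strip/count/set passes.

-- shared small sub-expressions (identical text in both Pythons)
-- s_str in ['-', 'nan', '', 'None']
def pvIsBlank (t : String) : Bool := t == "-" || t == "nan" || t == "" || t == "None"
-- "".join(filter(str.isdigit, t.split('.')[0])) as a char list; split('.') is never empty so [0] = headI
-- split? is some because "." is nonempty; split('.') is never empty so [0] = headI
def pvDigits (t : String) : List Char := (((PySem.Str.split? t ".").getD []).headI).toList.filter PySem.Chars.isdigit

-- ===== PORT A =====
-- f"{start} ao {last}" if start != last else str(start)
def pvRenderA (a b : Int) : String :=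
  if a ≠ b then PySem.Int.toStr a ++ " ao " ++ PySem.Int.toStr b else PySem.Int.toStr a

def formatar_sequencia_visual (lista_seq : List String) : String :=
  let p := lista_seq.foldl (fun (acc : List Int × Int) s =>
      let t := PySem.Str.strip s
      if pvIsBlank t then (acc.1, acc.2 + 1)
      else
        let num := pvDigits t
        -- num is nonempty and all digits here, so Python's int(num) always parses
        if num ≠ [] then (acc.1 ++ [(PySem.Int.ofChars? num).getD 0], acc.2) else acc)
    ([], 0)
  let numeros := p.1
  let adicionais := p.2
  if numeros = [] then
    (if adicionais = 0 then "📦 Sem Ordem" else "📦 " ++ PySem.Int.toStr adicionais ++ " Adds")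
  else
    let nums := PySem.List.sorted (PySem.Set.ofList numeros) (fun x => x) false
    -- numeros ≠ [] so nums ≠ [] and numeros[0] never raises: headI is exact
    let st := nums.tail.foldl (fun (acc : List String × Int × Int) n =>
        if n = acc.2.2 + 1 then (acc.1, acc.2.1, n)
        else (acc.1 ++ [pvRenderA acc.2.1 acc.2.2], n, n))
      ([], nums.headI, nums.headI)
    let ranges := st.1 ++ [pvRenderA st.2.1 st.2.2]
    let resumo := "Pacote " ++ PySem.Str.join ", " ranges
    let resumo := if adicionais > 0 then resumo ++ " + " ++ PySem.Int.toStr adicionais ++ " Add" else resumo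
    "📦 " ++ resumo

-- ===== PORT B =====
-- str(a) if a == b else f"{a} ao {b}"
def pvRenderB (a b : Int) : String :=
  if a = b then PySem.Int.toStr a else PySem.Int.toStr a ++ " ao " ++ PySem.Int.toStr b

-- _runs: recursive maximal-consecutive-run splitter
def pvRuns (start last : Int) (rest : List Int) : List (Int × Int) :=
  match rest with
  | [] => [(start, last)]
  | n :: tail => if n = last + 1 then pvRuns start n tail else (start, last) :: pvRuns n n tail

def formatar_sequencia_visual_alt (lista_seq : List String) : String :=
  let cleaned := lista_seq.map PySem.Str.strip
  let adicionais : Int := ((cleaned.filter pvIsBlank).length : Int)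
  let numsSet := cleaned.foldl (fun (s : PySem.Set Int) t =>
      if !pvIsBlank t then
        let d := pvDigits t
        if d ≠ [] then PySem.Set.add s ((PySem.Int.ofChars? d).getD 0) else s
      else s) PySem.Set.empty
  if numsSet = [] then
    (if adicionais = 0 then "📦 Sem Ordem" else "📦 " ++ PySem.Int.toStr adicionais ++ " Adds")
  else
    match PySem.List.sorted numsSet (fun x => x) false with
    | [] =>
      -- unreachable: sorting a nonempty set is nonempty
      ""
    | m :: rest =>
      let corpo := PySem.Str.join ", " ((pvRuns m m rest).map (fun p => pvRenderB p.1 p.2))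
      let resumo := "Pacote " ++ corpo
      let resumo := if adicionais > 0 then resumo ++ " + " ++ PySem.Int.toStr adicionais ++ " Add" else resumo
      "📦 " ++ resumo

-- ===== PRECONDITION & SPEC =====
def Spec_formatar_sequencia_visual (lista_seq : List String) (out : String) : Prop := out = formatar_sequencia_visual_alt lista_seq
instance (lista_seq : List String) (out : String) : Decidable (Spec_formatar_sequencia_visual lista_seq out) := by unfold Spec_formatar_sequencia_visual; infer_instance

-- ===== CLAIM (what is proved, stated in full; the proofs are below) =====
def Claim_equal_formatar_sequencia_visual : Prop := ∀ (lista_seq : List String), Dom_formatar_sequencia_visual lista_seq → Spec_formatar_sequencia_visual lista_seq (formatar_sequencia_visual lista_seq)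

-- ===== LEMMAS AND PROOFS =====

-- the parsed numbers, element by element
def pvNumsOf (ls : List String) : List Int :=
  ls.flatMap (fun s =>
    let t := PySem.Str.strip s
    if pvIsBlank t then []
    else if pvDigits t ≠ [] then [(PySem.Int.ofChars? (pvDigits t)).getD 0] else [])

lemma parseA_eq (ls : List String) : ∀ (ns : List Int) (k : Int),
    ls.foldl (fun (acc : List Int × Int) s =>
      let t := PySem.Str.strip s
      if pvIsBlank t then (acc.1, acc.2 + 1)
      else
        let num := pvDigits t
        if num ≠ [] then (acc.1 ++ [(PySem.Int.ofChars? num).getD 0], acc.2) else acc)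
      (ns, k)
    = (ns ++ pvNumsOf ls, k + (((ls.map PySem.Str.strip).filter pvIsBlank).length : Int)) := by
  induction ls with
  | nil => intro ns k; simp [pvNumsOf]
  | cons s tl ih =>
    intro ns k
    rw [List.foldl_cons]
    by_cases hb : pvIsBlank (PySem.Str.strip s)
    · show tl.foldl _ (if pvIsBlank (PySem.Str.strip s) then _ else _) = _
      rw [if_pos hb, ih]
      simp [pvNumsOf, hb]
      ring
    · by_cases hd : pvDigits (PySem.Str.strip s) = []
      · show tl.foldl _ (if pvIsBlank (PySem.Str.strip s) then _
          else if pvDigits (PySem.Str.strip s) ≠ [] then _ else (ns, k)) = _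
        rw [if_neg hb, if_neg (by simpa using hd), ih]
        simp [pvNumsOf, hb, hd]
      · show tl.foldl _ (if pvIsBlank (PySem.Str.strip s) then _
          else if pvDigits (PySem.Str.strip s) ≠ [] then
            (ns ++ [(PySem.Int.ofChars? (pvDigits (PySem.Str.strip s))).getD 0], k) else _) = _
        rw [if_neg hb, if_pos hd, ih]
        simp [pvNumsOf, hb, hd]

lemma setB_eq (ls : List String) : ∀ (s : PySem.Set Int),
    (ls.map PySem.Str.strip).foldl (fun (s : PySem.Set Int) t =>
      if !pvIsBlank t then
        let d := pvDigits t
        if d ≠ [] then PySem.Set.add s ((PySem.Int.ofChars? d).getD 0) else s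
      else s) s
    = (pvNumsOf ls).foldl PySem.Set.add s := by
  induction ls with
  | nil => intro s; simp [pvNumsOf]
  | cons x tl ih =>
    intro s
    rw [List.map_cons, List.foldl_cons]
    by_cases hb : pvIsBlank (PySem.Str.strip x)
    · show (tl.map PySem.Str.strip).foldl _
        (if !pvIsBlank (PySem.Str.strip x) then _ else s) = _
      rw [if_neg (by simp [hb]), ih]
      simp [pvNumsOf, hb]
    · by_cases hd : pvDigits (PySem.Str.strip x) = []
      · show (tl.map PySem.Str.strip).foldl _
          (if !pvIsBlank (PySem.Str.strip x) then
            if pvDigits (PySem.Str.strip x) ≠ [] then _ else s else _) = _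
        rw [if_pos (by simp [hb]), if_neg (by simpa using hd), ih]
        simp [pvNumsOf, hb, hd]
      · show (tl.map PySem.Str.strip).foldl _
          (if !pvIsBlank (PySem.Str.strip x) then
            if pvDigits (PySem.Str.strip x) ≠ [] then
              PySem.Set.add s ((PySem.Int.ofChars? (pvDigits (PySem.Str.strip x))).getD 0) else _ else _) = _
        rw [if_pos (by simp [hb]), if_pos hd, ih]
        simp [pvNumsOf, hb, hd]

lemma render_eq (a b : Int) : pvRenderA a b = pvRenderB a b := by
  unfold pvRenderA pvRenderB
  by_cases h : a = b <;> simp [h]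

lemma runs_eq (rest : List Int) : ∀ (ranges : List String) (start last : Int),
    (let st := rest.foldl (fun (acc : List String × Int × Int) n =>
        if n = acc.2.2 + 1 then (acc.1, acc.2.1, n)
        else (acc.1 ++ [pvRenderA acc.2.1 acc.2.2], n, n)) (ranges, start, last)
     st.1 ++ [pvRenderA st.2.1 st.2.2])
    = ranges ++ (pvRuns start last rest).map (fun p => pvRenderB p.1 p.2) := by
  induction rest with
  | nil => intro ranges start last; simp [pvRuns, render_eq]
  | cons n tl ih =>
    intro ranges start last
    simp only [List.foldl_cons, pvRuns]
    by_cases h : n = last + 1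
    · simpa [h] using ih ranges start n
    · simpa [h, render_eq] using ih (ranges ++ [pvRenderA start last]) n n

theorem pv_main (ls : List String) :
    formatar_sequencia_visual ls = formatar_sequencia_visual_alt ls := by
  unfold formatar_sequencia_visual formatar_sequencia_visual_alt
  simp only [parseA_eq, setB_eq, List.nil_append, Int.zero_add]
  have hset : PySem.Set.ofList (pvNumsOf ls)
      = List.foldl PySem.Set.add PySem.Set.empty (pvNumsOf ls) :=
    PySem.Set.ofList_eq_foldl _
  by_cases hnil : pvNumsOf ls = []
  · simp [hnil, PySem.Set.empty]
  · have hsetne : List.foldl PySem.Set.add PySem.Set.empty (pvNumsOf ls) ≠ [] := by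
      rw [← hset]
      intro h
      rcases List.exists_mem_of_ne_nil _ hnil with ⟨x, hx⟩
      have hm : x ∈ PySem.Set.ofList (pvNumsOf ls) := (PySem.Set.mem_ofList _ _).2 hx
      rw [h] at hm
      exact absurd hm List.not_mem_nil
    rw [if_neg hnil, if_neg hsetne, ← hset]
    cases hs : PySem.List.sorted (PySem.Set.ofList (pvNumsOf ls)) (fun x => x) false with
    | nil =>
      exact absurd ((PySem.List.sorted_eq_nil_iff _ _ _).1 hs) (fun h => hsetne (hset ▸ h))
    | cons m rest =>
      simp only [List.headI, List.tail_cons]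
      have := runs_eq rest [] m m
      simp only [List.nil_append] at this
      simp only [this]

-- ===== VERDICT (by name: the statement is the Claim_ definition above) =====
theorem formatar_sequencia_visual_spec : Claim_equal_formatar_sequencia_visual := by
  intro ls _
  unfold Spec_formatar_sequencia_visual
  exact pv_main ls
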